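-- pv_equiv track=rewrite | github.com/databendlabs/wizard | job/job_runner.py | _group_queries_by_prefix
-- ===== SOURCE A (Python) =====
-- def _group_queries_by_prefix(queries):
--     """Group SQL queries by their prefix (first word)"""
--     groups = {}
--
--     for query in queries:
--         # Skip empty queries
--         if not query.strip():
--             continue
--
--         # Extract the first word as the prefix
--         words = query.strip().split()
--         if not words:
--             continue
--
--         prefix = words[0].upper()
--
--         # Add to the appropriate group
--         if prefix not in groups:
--             groups[prefix] = []
--         groups[prefix].append(query)
--
--     return groups
-- ===== SOURCE B (Python) =====
-- def _group_queries_by_prefix(queries):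
--     keyed = [(q.strip().split()[0].upper(), q) for q in queries if q.strip()]
--     prefixes = list(dict.fromkeys(k for k, _ in keyed))
--     return {p: [q for k, q in keyed if k == p] for p in prefixes}
-- ===== Notes on version B (the rewrite author's own statement) =====
-- stated objective: alternative
-- what changed: A builds the dict in one pass, bucketing each query as it goes; B first builds a (prefix, query) keyed list of the non-blank queries, dedups the prefixes in first-appearance order (dict.fromkeys), and then gathers each group with one filter pass per prefix.
import Mathlib
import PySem

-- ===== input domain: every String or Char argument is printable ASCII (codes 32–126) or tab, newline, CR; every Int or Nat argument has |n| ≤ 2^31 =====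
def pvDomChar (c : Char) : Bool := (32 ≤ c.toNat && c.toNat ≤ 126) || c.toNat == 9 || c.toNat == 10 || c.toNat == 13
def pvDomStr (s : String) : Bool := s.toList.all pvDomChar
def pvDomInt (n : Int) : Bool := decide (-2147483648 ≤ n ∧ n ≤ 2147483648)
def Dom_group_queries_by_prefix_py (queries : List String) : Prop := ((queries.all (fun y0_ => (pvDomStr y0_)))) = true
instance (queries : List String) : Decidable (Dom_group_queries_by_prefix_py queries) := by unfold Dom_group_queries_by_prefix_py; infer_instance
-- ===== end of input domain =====

-- B replaces A's one-pass hash-bucketing with a keyed list + ordered key dedup + one gather pass per key (objective: alternative decomposition, same results).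

-- ===== PORT A =====
-- one iteration of A's loop body
def pvAStep (groups : PySem.Dict String (List String)) (query : String) : PySem.Dict String (List String) :=
  if PySem.Str.strip query = "" then groups          -- if not query.strip(): continue
  else
    match PySem.Str.split₀ (PySem.Str.strip query) with   -- words = query.strip().split()
    | [] => groups                                    -- if not words: continue
    | w :: _ =>                                       -- prefix = words[0].upper()
      let pfx := PySem.Str.upper w
      let groups := if groups.contains pfx = false then groups.insert pfx [] else groups
      groups.modify pfx [] (fun l => l ++ [query])    -- groups[prefix].append(query)

def group_queries_by_prefix_py (queries : List String) : List (String × List String) :=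
  (queries.foldl pvAStep PySem.Dict.empty).items

-- ===== PORT B =====
-- q.strip().split()[0].upper(); the [0] is only evaluated on queries with nonempty strip, where split() is nonempty, so headD is exact
def pvPrefixOf (q : String) : String :=
  PySem.Str.upper ((PySem.Str.split₀ (PySem.Str.strip q)).headD "")

def group_queries_by_prefix_py_alt (queries : List String) : List (String × List String) :=
  let keyed := (queries.filter (fun q => PySem.Str.strip q != "")).map (fun q => (pvPrefixOf q, q))
  let prefixes := PySem.List.dedup (keyed.map (·.1))             -- list(dict.fromkeys(...))
  prefixes.map (fun p => (p, (keyed.filter (fun kq => kq.1 == p)).map (·.2)))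

-- ===== PRECONDITION & SPEC =====
def Spec_group_queries_by_prefix_py (queries : List String) (out : List (String × List String)) : Prop := out = group_queries_by_prefix_py_alt queries
instance (queries : List String) (out : List (String × List String)) : Decidable (Spec_group_queries_by_prefix_py queries out) := by unfold Spec_group_queries_by_prefix_py; infer_instance

-- ===== CLAIM (what is proved, stated in full; the proofs are below) =====
def Claim_equal_group_queries_by_prefix_py : Prop := ∀ (queries : List String), Dom_group_queries_by_prefix_py queries → Spec_group_queries_by_prefix_py queries (group_queries_by_prefix_py queries)

-- ===== LEMMAS AND PROOFS =====

-- a list with some non-space character splits into at least one word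
theorem pv_split_go_ne_nil (s : List Char) : ∀ cur acc,
    (acc ≠ [] ∨ cur ≠ [] ∨ ∃ c ∈ s, PySem.Chars.isspace c = false) →
    PySem.Chars.split₀.go s cur acc ≠ [] := by
  induction s with
  | nil =>
    intro cur acc h
    simp only [PySem.Chars.split₀.go]
    rcases h with h | h | h
    · split <;> simp_all
    · have : cur.isEmpty = false := by simpa using h
      simp [this]
    · simp_all
  | cons c rest ih =>
    intro cur acc h
    simp only [PySem.Chars.split₀.go]
    by_cases hsp : PySem.Chars.isspace c = true
    · simp only [hsp, if_true]
      by_cases hc : cur.isEmpty = true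
      · simp only [hc, if_true]
        apply ih
        rcases h with h | h | h
        · exact Or.inl h
        · exact absurd (List.isEmpty_iff.mp hc) h
        · rcases h with ⟨d, hd, hds⟩
          rcases List.mem_cons.mp hd with hd | hd
          · subst hd; rw [hsp] at hds; cases hds
          · exact Or.inr (Or.inr ⟨d, hd, hds⟩)
      · simp only [hc]
        exact ih [] (cur.reverse :: acc) (Or.inl (by simp))
    · simp only [eq_false_of_ne_true hsp]
      exact ih (c :: cur) acc (Or.inr (Or.inl (by simp)))
      
theorem pv_split₀_ne_nil (s : List Char) (h : ∃ c ∈ s, PySem.Chars.isspace c = false) :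
    PySem.Chars.split₀ s ≠ [] := by
  unfold PySem.Chars.split₀
  exact pv_split_go_ne_nil s [] [] (Or.inr (Or.inr h))

-- a nonempty stripped string contains a non-space character (its head)
theorem pv_strip_exists_nonspace (s : List Char) (h : PySem.Chars.strip s ≠ []) :
    ∃ c ∈ PySem.Chars.strip s, PySem.Chars.isspace c = false := by
  -- strip s is a nonempty prefix of lstrip s, whose head is non-space
  unfold PySem.Chars.strip PySem.Chars.rstrip at *
  set l := PySem.Chars.lstrip s with hl
  have hpre : (List.dropWhile PySem.Chars.isspace l.reverse).reverse <+: l := by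
    have := List.dropWhile_suffix (l := l.reverse) (p := PySem.Chars.isspace)
    rcases this with ⟨t, ht⟩
    refine ⟨t.reverse, ?_⟩
    have := congrArg List.reverse ht
    simpa using this
  rcases hpre with ⟨t, ht⟩
  cases hr : (List.dropWhile PySem.Chars.isspace l.reverse).reverse with
  | nil => exact absurd hr h
  | cons a u =>
    refine ⟨a, by simp, ?_⟩
    -- a is the head of l = dropWhile isspace s, hence non-space
    have hal : l = a :: (u ++ t) := by rw [← ht, hr]; simp
    have this := List.head?_dropWhile_not (p := PySem.Chars.isspace) (l := s)
    have hl2 : l = List.dropWhile PySem.Chars.isspace s := hl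
    rw [← hl2, hal] at this
    simp only [List.head?_cons] at this
    exact this

-- A's "ensure key then append" equals a single modify-with-default
theorem pv_ensure_modify (d : PySem.Dict String (List String)) (k : String)
    (f : List String → List String) :
    (if d.contains k = false then d.insert k [] else d).modify k [] f = d.modify k [] f := by
  by_cases h : d.contains k = false
  · simp only [h, if_true]
    simp [PySem.Dict.modify, PySem.Dict.getD_insert_self, PySem.Dict.insert_insert_self,
      PySem.Dict.getD_of_not_contains d ([] : List String) h]
  · simp [h]

def pvModStep (d : PySem.Dict String (List String)) (p : String × String) : PySem.Dict String (List String) :=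
  d.modify p.1 [] (fun l => l ++ [p.2])

def pvKeyed (queries : List String) : List (String × String) :=
  (queries.filter (fun q => PySem.Str.strip q != "")).map (fun q => (pvPrefixOf q, q))

-- A's loop over queries is the modify-fold over the keyed survivors
theorem pv_foldA (queries : List String) : ∀ d,
    queries.foldl pvAStep d = (pvKeyed queries).foldl pvModStep d := by
  induction queries with
  | nil => intro d; simp [pvKeyed]
  | cons q rest ih =>
    intro d
    by_cases hq : PySem.Str.strip q = ""
    · simp only [pvKeyed, List.filter_cons, List.foldl_cons]
      have : (PySem.Str.strip q != "") = false := by simp [hq]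
      rw [this]
      have hstep : pvAStep d q = d := by simp [pvAStep, hq]
      rw [hstep]
      exact ih d
    · have hs : PySem.Chars.strip q.toList ≠ [] := by
        intro hnil
        apply hq
        have h2 : (PySem.Str.strip q).toList = [] := by
          rw [PySem.Str.toList_strip]; exact hnil
        have := congrArg String.mk h2
        simpa using this
      have hne : PySem.Chars.split₀ (PySem.Chars.strip q.toList) ≠ [] :=
        pv_split₀_ne_nil _ (pv_strip_exists_nonspace _ hs)
      have hne' : PySem.Str.split₀ (PySem.Str.strip q) ≠ [] := by
        intro hnil
        apply hne
        have := congrArg (List.map String.toList) hnil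
        rw [PySem.Str.split₀_map_toList, PySem.Str.toList_strip] at this
        simpa using this
      obtain ⟨w, ws, hw⟩ := List.exists_cons_of_ne_nil hne'
      simp only [pvKeyed, List.filter_cons, List.foldl_cons]
      have : (PySem.Str.strip q != "") = true := by simp [hq]
      rw [this]
      have hpfx : pvPrefixOf q = PySem.Str.upper w := by simp [pvPrefixOf, hw]
      have hstep : pvAStep d q = pvModStep d (pvPrefixOf q, q) := by
        simp only [pvAStep, if_neg hq, hw, pvModStep, hpfx]
        exact pv_ensure_modify d (PySem.Str.upper w) _
      rw [hstep]
      exact ih _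
      
-- the modify-fold's items are exactly B's dedup-then-gather
theorem pv_fold_items (l : List (String × String)) :
    ((l.foldl pvModStep PySem.Dict.empty).items) =
      (PySem.List.dedup (l.map (·.1))).map
        (fun p => (p, (l.filter (fun kq => kq.1 == p)).map (·.2))) := by
  have hfold : l.foldl pvModStep PySem.Dict.empty =
      l.foldl (fun d x => d.modify x.1 [] ((fun _ _ v => v ++ [x.2]) d x)) PySem.Dict.empty := rfl
  have hnd : ((l.foldl pvModStep PySem.Dict.empty).keys).Nodup := by
    rw [hfold]
    exact PySem.Dict.nodup_keys_foldl_modify_key l (·.1) [] _ _ PySem.Dict.nodup_keys_empty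
  rw [PySem.Dict.items_eq_map_keys _ hnd []]
  have hkeys : (l.foldl pvModStep PySem.Dict.empty).keys = PySem.List.dedup (l.map (·.1)) := by
    rw [hfold, PySem.Dict.keys_foldl_modify_key, PySem.List.dedup_eq_ofList]
    simp [PySem.Set.update, PySem.Set.ofList, PySem.Dict.keys_empty, PySem.Set.empty]
  rw [hkeys]
  apply List.map_congr_left
  intro k _
  have := PySem.Dict.getD_foldl_modify_append l (PySem.Dict.empty) k
  simp only [PySem.Dict.getD_empty, List.nil_append] at this
  rw [show (fun (d : PySem.Dict String (List String)) (p : String × String) =>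
        d.modify p.1 [] fun x => x ++ [p.2]) = pvModStep from rfl] at this
  rw [this]

-- ===== VERDICT (by name: the statement is the Claim_ definition above) =====
theorem group_queries_by_prefix_py_spec : Claim_equal_group_queries_by_prefix_py := by
  intro queries _
  unfold Spec_group_queries_by_prefix_py group_queries_by_prefix_py group_queries_by_prefix_py_alt
  rw [pv_foldA queries PySem.Dict.empty]
  exact pv_fold_items (pvKeyed queries)
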